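-- pv_equiv track=rewrite | github.com/Vansh-Arora/rough-Pie | makeMaxProd.py | maxSpecialProduct
-- ===== SOURCE A (Python) =====
-- def maxSpecialProduct(A):
--     n = len(A)
--     LSV = [0]
--     for i in range(1,n):
--         j = i - 1
--         while j > -1:
--             if A[j] > A[i]:
--                 LSV.append(j)
--                 break
--             j -= 1
--         if i+1 > len(LSV):
--             LSV.append(0)
--
--     RSV = []
--     for i in range(0,n-1):
--         j = i + 1
--         while j < n:
--             if A[j] > A[i]:
--                 RSV.append(j)
--                 break
--             j += 1
--         if i+1 > len(RSV):
--             RSV.append(0)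
--     RSV.append(0)
--     max = 0
--     for i in range(n):
--         if LSV[i] * RSV[i] > max:
--             max = LSV[i] * RSV[i]
--     return max % (10**9 + 7)
-- ===== SOURCE B (Python) =====
-- def maxSpecialProduct(A):
--     # Monotonic-stack nearest-greater-index on both sides: O(n) instead of A's O(n^2).
--     n = len(A)
--     left = []
--     stack = []
--     for i in range(n):
--         while stack and A[stack[-1]] <= A[i]:
--             stack.pop()
--         left.append(stack[-1] if stack else 0)
--         stack.append(i)
--     right = []
--     stack = []
--     for i in reversed(range(n)):
--         while stack and A[stack[-1]] <= A[i]: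
--             stack.pop()
--         right.append(stack[-1] if stack else 0)
--         stack.append(i)
--     right.reverse()
--     best = 0
--     for l, r in zip(left, right):
--         p = l * r
--         if p > best:
--             best = p
--     return best % (10 ** 9 + 7)
-- ===== Notes on version B (the rewrite author's own statement) =====
-- stated objective: faster
-- what changed: Replaced A's per-index linear scans for the nearest greater element on each side with two monotonic-stack passes, so each index is pushed and popped at most once.
import Mathlib
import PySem

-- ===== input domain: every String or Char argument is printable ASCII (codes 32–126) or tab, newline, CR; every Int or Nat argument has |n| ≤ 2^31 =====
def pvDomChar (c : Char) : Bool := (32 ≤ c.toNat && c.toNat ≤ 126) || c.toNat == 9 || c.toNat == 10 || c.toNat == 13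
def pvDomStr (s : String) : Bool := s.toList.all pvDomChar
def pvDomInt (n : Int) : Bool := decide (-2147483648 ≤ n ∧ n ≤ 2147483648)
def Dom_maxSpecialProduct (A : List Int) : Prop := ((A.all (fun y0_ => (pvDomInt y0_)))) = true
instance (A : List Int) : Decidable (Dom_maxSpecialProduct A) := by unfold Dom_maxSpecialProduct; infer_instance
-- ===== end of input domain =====

-- B replaces A's quadratic per-index scans by two monotonic-stack passes (O(n)); same result.

-- ===== PORT A =====
-- A's inner `while j > -1` scan for the nearest greater element to the left:
-- argument is j+1 where j is Python's current index (0 = Python's j == -1, loop ends).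
-- All index accesses are in range (0 ≤ j < len A), so `getD _ 0` is exact.
def pvFindLeft (A : List Int) (x : Int) : Nat → Option Nat
  | 0 => none
  | j + 1 => if A.getD j 0 > x then some j else pvFindLeft A x j

-- A's inner `while j < n` scan to the right, starting at j.
def pvFindRight (A : List Int) (x : Int) (n : Nat) (j : Nat) : Option Nat :=
  if j < n then (if A.getD j 0 > x then some j else pvFindRight A x n (j + 1)) else none
termination_by n - j

-- the value A appends to LSV at iteration i (break-append, else the `if i+1 > len(LSV)` 0)
def pvLEntry (A : List Int) (i : Nat) : Int :=
  match pvFindLeft A (A.getD i 0) i with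
  | some j => (j : Int)
  | none => 0

-- the value A appends to RSV at iteration i
def pvREntry (A : List Int) (n i : Nat) : Int :=
  match pvFindRight A (A.getD i 0) n (i + 1) with
  | some j => (j : Int)
  | none => 0

def maxSpecialProduct (A : List Int) : Int :=
  let n := A.length
  let LSV : List Int := (List.range' 1 (n - 1)).foldl (fun acc i => acc ++ [pvLEntry A i]) [0]
  let RSV : List Int :=
    ((List.range' 0 (n - 1)).foldl (fun acc i => acc ++ [pvREntry A n i]) []) ++ [0]
  let m := (List.range n).foldl
    (fun m i => if LSV.getD i 0 * RSV.getD i 0 > m then LSV.getD i 0 * RSV.getD i 0 else m) 0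
  PySem.Int.mod m (10 ^ 9 + 7)

-- ===== PORT B =====
-- B's `while stack and A[stack[-1]] <= A[i]: stack.pop()` (stack head = top)
def pvPop (A : List Int) (x : Int) : List Nat → List Nat
  | [] => []
  | t :: r => if A.getD t 0 ≤ x then pvPop A x r else t :: r

-- B's `stack[-1] if stack else 0`
def pvTop (s : List Nat) : Int :=
  match s.head? with
  | some j => (j : Int)
  | none => 0

-- one iteration of either stack pass of B: pop, record the answer, push i
def pvStepL (A : List Int) (st : List Nat × List Int) (i : Nat) : List Nat × List Int :=
  let s := pvPop A (A.getD i 0) st.1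
  (i :: s, st.2 ++ [pvTop s])

def maxSpecialProduct_alt (A : List Int) : Int :=
  let n := A.length
  let left := ((List.range n).foldl (pvStepL A) ([], [])).2
  let right := (((List.range n).reverse.foldl (pvStepL A) ([], [])).2).reverse
  let best := (left.zip right).foldl
    (fun b p => if p.1 * p.2 > b then p.1 * p.2 else b) 0
  PySem.Int.mod best (10 ^ 9 + 7)

-- ===== PRECONDITION & SPEC =====
def Spec_maxSpecialProduct (A : List Int) (out : Int) : Prop := out = maxSpecialProduct_alt A
instance (A : List Int) (out : Int) : Decidable (Spec_maxSpecialProduct A out) := by unfold Spec_maxSpecialProduct; infer_instance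

-- ===== CLAIM (what is proved, stated in full; the proofs are below) =====
def Claim_equal_maxSpecialProduct : Prop := ∀ (A : List Int), Dom_maxSpecialProduct A → Spec_maxSpecialProduct A (maxSpecialProduct A)

-- ===== LEMMAS AND PROOFS =====

-- popping with a lower threshold first is absorbed by popping with a higher one
theorem pvPop_pvPop (A : List Int) {x y : Int} (h : y ≤ x) (s : List Nat) :
    pvPop A x (pvPop A y s) = pvPop A x s := by
  induction s with
  | nil => simp only [pvPop]
  | cons t r ih =>
    by_cases ht : A.getD t 0 ≤ y
    · rw [pvPop, if_pos ht, ih, pvPop, if_pos (le_trans ht h)]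
    · rw [pvPop, if_neg ht]

-- appending fold = init ++ map
theorem foldl_append_map (f : Nat → Int) (l : List Nat) (init : List Int) :
    l.foldl (fun acc i => acc ++ [f i]) init = init ++ l.map f := by
  induction l generalizing init with
  | nil => simp
  | cons a l ih => simp [ih]

theorem pvStepL_fst (A : List Int) (st : List Nat × List Int) (i : Nat) :
    (pvStepL A st i).1 = i :: pvPop A (A.getD i 0) st.1 := rfl

theorem pvStepL_snd (A : List Int) (st : List Nat × List Int) (i : Nat) :
    (pvStepL A st i).2 = st.2 ++ [pvTop (pvPop A (A.getD i 0) st.1)] := rfl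

theorem pvPop_cons (A : List Int) (x : Int) (t : Nat) (r : List Nat) :
    pvPop A x (t :: r) = if A.getD t 0 ≤ x then pvPop A x r else t :: r := rfl

-- invariant of B's left pass: after processing 0..i-1, popping the stack at any
-- threshold x exposes exactly A's left scan result, and the output list so far
-- is the map of A's LSV entries.
theorem left_inv (A : List Int) (i : Nat) :
    (∀ x : Int,
      (pvPop A x (((List.range i).foldl (pvStepL A) ([], [])).1)).head? = pvFindLeft A x i)
    ∧ ((List.range i).foldl (pvStepL A) ([], [])).2 = (List.range i).map (pvLEntry A) := by
  induction i with
  | zero => constructor <;> simp [pvPop, pvFindLeft]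
  | succ i ih =>
    obtain ⟨ihs, iho⟩ := ih
    have hstep : (List.range (i + 1)).foldl (pvStepL A) ([], [])
        = pvStepL A ((List.range i).foldl (pvStepL A) ([], [])) i := by
      rw [List.range_succ, List.foldl_append, List.foldl_cons, List.foldl_nil]
    constructor
    · intro x
      rw [hstep, pvStepL_fst, pvPop_cons, pvFindLeft]
      by_cases hx : A.getD i 0 ≤ x
      · rw [if_pos hx, if_neg (not_lt.mpr hx), pvPop_pvPop A hx, ihs x]
      · rw [if_neg hx, if_pos (lt_of_not_ge hx)]
        rfl
    · rw [hstep, pvStepL_snd, iho, List.range_succ, List.map_append, List.map_cons, List.map_nil]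
      congr 1
      unfold pvTop pvLEntry
      rw [ihs (A.getD i 0)]

-- invariant of B's right pass, processing indices n-1 down to i (k = n - i left to process):
-- stack exposes A's right scan from i, and the output (reversed) is the RSV entries.
theorem right_inv (A : List Int) (n : Nat) (k : Nat) (hk : k ≤ n) :
    (∀ x : Int,
      (pvPop A x (((List.range' (n - k) k).foldr (fun j st => pvStepL A st j) ([], [])).1)).head?
        = pvFindRight A x n (n - k))
    ∧ ((List.range' (n - k) k).foldr (fun j st => pvStepL A st j) ([], [])).2
        = ((List.range' (n - k) k).map (fun j => pvREntry A n j)).reverse := by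
  induction k with
  | zero =>
    constructor
    · intro x
      rw [pvFindRight]
      simp [pvPop]
    · simp
  | succ k ih =>
    obtain ⟨ihs, iho⟩ := ih (Nat.le_of_succ_le hk)
    have hi : n - (k + 1) < n := by omega
    have hsucc : n - (k + 1) + 1 = n - k := by omega
    have hrange : List.range' (n - (k + 1)) (k + 1)
        = (n - (k + 1)) :: List.range' (n - k) k := by
      rw [List.range'_succ, hsucc]
    set i := n - (k + 1) with hidef
    have hstep : (List.range' i (k + 1)).foldr (fun j st => pvStepL A st j) ([], [])
        = pvStepL A ((List.range' (n - k) k).foldr (fun j st => pvStepL A st j) ([], [])) i := by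
      rw [hrange, List.foldr_cons]
    constructor
    · intro x
      rw [hstep, pvStepL_fst, pvPop_cons, pvFindRight, if_pos hi]
      by_cases hx : A.getD i 0 ≤ x
      · rw [if_pos hx, if_neg (not_lt.mpr hx), pvPop_pvPop A hx, ihs x, hsucc]
      · rw [if_neg hx, if_pos (lt_of_not_ge hx)]
        rfl
    · rw [hstep, pvStepL_snd, iho, hrange, List.map_cons, List.reverse_cons]
      congr 1
      unfold pvTop pvREntry
      rw [ihs (A.getD i 0), hsucc]

-- the reversed-range fold of B is the foldr the invariant speaks about
theorem right_fold_eq (A : List Int) (n : Nat) :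
    (List.range n).reverse.foldl (pvStepL A) ([], [])
      = (List.range' 0 n).foldr (fun j st => pvStepL A st j) ([], []) := by
  rw [List.foldl_reverse, List.range_eq_range']

-- getD on a map over range
theorem getD_map_range (f : Nat → Int) (n i : Nat) (hi : i < n) :
    ((List.range n).map f).getD i 0 = f i := by
  rw [List.getD_eq_getElem?_getD]
  simp [hi]

theorem maxSpecialProduct_eq (A : List Int) :
    maxSpecialProduct A = maxSpecialProduct_alt A := by
  rcases Nat.eq_zero_or_pos A.length with hn | hn
  · have hA : A = [] := List.length_eq_zero_iff.mp hn
    subst hA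
    simp [maxSpecialProduct, maxSpecialProduct_alt]
  · have hLSV : (List.range' 1 (A.length - 1)).foldl (fun acc i => acc ++ [pvLEntry A i]) [0]
        = (List.range A.length).map (pvLEntry A) := by
      rw [foldl_append_map]
      have : List.range A.length = 0 :: List.range' 1 (A.length - 1) := by
        rw [List.range_eq_range']
        cases h : A.length with
        | zero => omega
        | succ m => simp [List.range'_succ]
      rw [this, List.map_cons]
      have h0 : pvLEntry A 0 = 0 := by simp [pvLEntry, pvFindLeft]
      simp [h0]
    have hRSV : ((List.range' 0 (A.length - 1)).foldl (fun acc i => acc ++ [pvREntry A A.length i]) []) ++ [0]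
        = (List.range A.length).map (pvREntry A A.length) := by
      rw [foldl_append_map]
      have hlast : pvREntry A A.length (A.length - 1) = 0 := by
        have : A.length - 1 + 1 = A.length := by omega
        rw [pvREntry, this, pvFindRight]
        simp
      have : List.range A.length = List.range' 0 (A.length - 1) ++ [A.length - 1] := by
        have h1 : A.length = (A.length - 1) + 1 := by omega
        rw [List.range_eq_range']
        conv_lhs => rw [h1]
        rw [List.range'_1_concat]
        simp
      rw [this, List.map_append, List.map_cons, List.map_nil, List.nil_append, hlast]
    have hleft : ((List.range A.length).foldl (pvStepL A) ([], [])).2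
        = (List.range A.length).map (pvLEntry A) := (left_inv A A.length).2
    have hright : ((((List.range A.length).reverse.foldl (pvStepL A) ([], [])).2)).reverse
        = (List.range A.length).map (pvREntry A A.length) := by
      rw [right_fold_eq]
      have h := (right_inv A A.length A.length le_rfl).2
      rw [Nat.sub_self] at h
      rw [h, List.reverse_reverse, List.range_eq_range']
    show PySem.Int.mod _ _ = PySem.Int.mod _ _
    congr 1
    rw [hLSV, hRSV, hleft, hright]
    -- both sides are a fold over range with entries f i := pvLEntry, g i := pvREntry
    rw [List.zip_map', List.foldl_map]
    apply PySem.List.foldl_congr_mem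
    intro b i hi
    have hin : i < A.length := List.mem_range.mp hi
    rw [getD_map_range _ _ _ hin, getD_map_range _ _ _ hin]

-- ===== VERDICT (by name: the statement is the Claim_ definition above) =====
theorem maxSpecialProduct_spec : Claim_equal_maxSpecialProduct := by
  intro A _
  unfold Spec_maxSpecialProduct
  exact maxSpecialProduct_eq A
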